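-- pv_equiv track=rewrite | github.com/kylemd/xero-rpt-cm | tests/test_rules_integrity.py | _code_allowed_for_type
-- ===== SOURCE A (Python) =====
-- def _code_allowed_for_type(code: str, type_key: str, type_rules: dict) -> bool:
--     """Check if a code is allowed for a given type, using both exact and prefix matching."""
--     if type_key not in type_rules:
--         return True  # Unknown type, can't validate
--
--     entry = type_rules[type_key]
--     allowed_codes = set(entry.get("allowed_codes", []))
--     allowed_prefixes = set(entry.get("allowed_prefixes", []))
--
--     # Exact code match
--     if code in allowed_codes:
--         return True
--
--     # Prefix match: check if any prefix of the code is in allowed_prefixes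
--     code_parts = code.split(".")
--     for i in range(len(code_parts)):
--         prefix = ".".join(code_parts[: i + 1])
--         if prefix in allowed_prefixes:
--             return True
--
--     return False
-- ===== SOURCE B (Python) =====
-- def _code_allowed_for_type(code: str, type_key: str, type_rules: dict) -> bool:
--     """Check if a code is allowed for a given type, using both exact and prefix matching."""
--     if type_key not in type_rules:
--         return True  # Unknown type, can't validate
--
--     entry = type_rules[type_key]
--     if code in set(entry.get("allowed_codes", [])):
--         return True
--
--     # p is a dot-boundary prefix of code  <=>  (code + ".").startswith(p + ".")
--     dotted = code + "."
--     return any(dotted.startswith(p + ".") for p in entry.get("allowed_prefixes", []))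
-- ===== Notes on version B (the rewrite author's own statement) =====
-- stated objective: alternative
-- what changed: Instead of splitting code on '.' and testing each cumulative join-of-parts prefix for membership in the prefix set, B loops once over the allowed_prefixes list and tests the single string comparison (code + '.').startswith(p + '.'), never building the split parts or joined prefixes.
import Mathlib
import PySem

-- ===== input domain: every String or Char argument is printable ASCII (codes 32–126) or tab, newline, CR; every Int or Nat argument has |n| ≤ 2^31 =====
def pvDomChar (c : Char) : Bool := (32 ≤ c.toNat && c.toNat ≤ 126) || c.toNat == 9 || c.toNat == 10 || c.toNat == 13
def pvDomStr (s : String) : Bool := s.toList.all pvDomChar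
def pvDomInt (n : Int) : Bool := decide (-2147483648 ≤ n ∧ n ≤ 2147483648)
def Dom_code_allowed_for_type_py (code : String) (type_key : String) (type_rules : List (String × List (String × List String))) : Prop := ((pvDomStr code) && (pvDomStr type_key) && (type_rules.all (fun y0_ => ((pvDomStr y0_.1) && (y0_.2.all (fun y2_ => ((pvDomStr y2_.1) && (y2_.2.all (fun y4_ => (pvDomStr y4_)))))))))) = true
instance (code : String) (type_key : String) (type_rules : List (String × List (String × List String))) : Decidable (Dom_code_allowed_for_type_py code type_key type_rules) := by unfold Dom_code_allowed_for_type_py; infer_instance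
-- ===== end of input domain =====

-- B replaces A's split-into-parts/join enumeration of code's dot-boundary prefixes by a single
-- startswith test of (code + ".") against each allowed prefix p + "." (alternative decomposition).

-- ===== PORT A =====
def code_allowed_for_type_py (code : String) (type_key : String) (type_rules : List (String × List (String × List String))) : Bool :=
  match PySem.Dict.get? (PySem.Dict.mk type_rules) type_key with
  | none => true
  | some entry =>
    let allowed_codes : PySem.Set String :=
      PySem.Set.ofList (PySem.Dict.getD (PySem.Dict.mk entry) "allowed_codes" [])
    let allowed_prefixes : PySem.Set String :=
      PySem.Set.ofList (PySem.Dict.getD (PySem.Dict.mk entry) "allowed_prefixes" [])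
    if PySem.Set.contains allowed_codes code then true
    else
      let code_parts := PySem.Chars.splitOn code.toList ['.']
      (List.range code_parts.length).any (fun i =>
        PySem.Set.contains allowed_prefixes (String.ofList (PySem.Chars.join ['.'] (code_parts.take (i + 1)))))

-- ===== PORT B =====
def code_allowed_for_type_py_alt (code : String) (type_key : String) (type_rules : List (String × List (String × List String))) : Bool :=
  match PySem.Dict.get? (PySem.Dict.mk type_rules) type_key with
  | none => true
  | some entry =>
    if PySem.Set.contains (PySem.Set.ofList (PySem.Dict.getD (PySem.Dict.mk entry) "allowed_codes" [])) code then true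
    else
      let dotted := code.toList ++ ['.']
      (PySem.Dict.getD (PySem.Dict.mk entry) "allowed_prefixes" []).any (fun p =>
        PySem.Chars.startswith dotted (p.toList ++ ['.']))

-- ===== PRECONDITION & SPEC =====
def Spec_code_allowed_for_type_py (code : String) (type_key : String) (type_rules : List (String × List (String × List String))) (out : Bool) : Prop := out = code_allowed_for_type_py_alt code type_key type_rules
instance (code : String) (type_key : String) (type_rules : List (String × List (String × List String))) (out : Bool) : Decidable (Spec_code_allowed_for_type_py code type_key type_rules out) := by unfold Spec_code_allowed_for_type_py; infer_instance

-- ===== CLAIM (what is proved, stated in full; the proofs are below) =====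
def Claim_equal_code_allowed_for_type_py : Prop := ∀ (code : String) (type_key : String) (type_rules : List (String × List (String × List String))), Dom_code_allowed_for_type_py code type_key type_rules → Spec_code_allowed_for_type_py code type_key type_rules (code_allowed_for_type_py code type_key type_rules)

-- ===== LEMMAS AND PROOFS =====
def pSplit : List Char → List (List Char)
  | [] => [[]]
  | c :: rest => if c = '.' then [] :: pSplit rest else (pSplit rest).modifyHead (c :: ·)

theorem pSplit_ne_nil (cs : List Char) : pSplit cs ≠ [] := by
  induction cs with
  | nil => simp [pSplit]
  | cons c rest ih =>
    simp only [pSplit]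
    split_ifs
    · simp
    · cases h : pSplit rest with
      | nil => exact absurd h ih
      | cons a b => simp

theorem splitOn_go_eq (fuel : Nat) : ∀ (cs cur : List Char) (acc : List (List Char))
    (h : List Char) (t : List (List Char)), cs.length < fuel → pSplit cs = h :: t →
    PySem.Chars.splitOn.go ['.'] fuel cs cur acc = acc.reverse ++ (cur.reverse ++ h) :: t := by
  induction fuel with
  | zero => intro cs cur acc h t hlt; omega
  | succ fuel ih =>
    intro cs cur acc h t hlt hps
    cases cs with
    | nil =>
      simp [pSplit] at hps
      simp [PySem.Chars.splitOn.go, hps.1, hps.2]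
    | cons c rest =>
      simp only [PySem.Chars.splitOn.go]
      by_cases hc : c = '.'
      · subst hc
        simp only [pSplit, ite_true] at hps
        have hne := pSplit_ne_nil rest
        cases hpr : pSplit rest with
        | nil => exact absurd hpr hne
        | cons h' t' =>
          rw [hpr] at hps
          obtain ⟨rfl, rfl⟩ := by simpa using hps
          have : List.isPrefixOf ['.'] ('.' :: rest) = true := by simp [List.isPrefixOf]
          rw [if_pos this]
          simp only [List.length_cons] at hlt
          simp only [List.length_cons, List.length_nil, List.drop_succ_cons, List.drop_zero]
          rw [ih rest [] (cur.reverse :: acc) h' t' (by omega) hpr]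
          simp
      · have hpre : List.isPrefixOf ['.'] (c :: rest) = false := by
          simp [List.isPrefixOf]
          exact fun hh => hc hh.symm
        rw [if_neg (by simp [hpre])]
        have hne := pSplit_ne_nil rest
        cases hpr : pSplit rest with
        | nil => exact absurd hpr hne
        | cons h' t' =>
          simp only [pSplit, if_neg hc, hpr, List.modifyHead] at hps
          obtain ⟨rfl, rfl⟩ := by simpa using hps
          simp only [List.length_cons] at hlt
          rw [ih rest (c :: cur) acc h' t' (by omega) hpr]
          simp

theorem splitOn_eq_pSplit (cs : List Char) : PySem.Chars.splitOn cs ['.'] = pSplit cs := by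
  have hne := pSplit_ne_nil cs
  cases hpr : pSplit cs with
  | nil => exact absurd hpr hne
  | cons h t =>
    unfold PySem.Chars.splitOn
    rw [splitOn_go_eq (cs.length + 1) cs [] [] h t (by omega) hpr]
    simp

theorem join_cons_eq (c : Char) (h : List Char) (l : List (List Char)) :
    PySem.Chars.join ['.'] ((c :: h) :: l) = c :: PySem.Chars.join ['.'] (h :: l) := by
  cases l with
  | nil => simp [PySem.Chars.join, List.intercalate]
  | cons x l' => simp [PySem.Chars.join_cons_cons]

theorem join_nil_cons (a : List Char) (b : List (List Char)) :
    PySem.Chars.join ['.'] ([] :: a :: b) = '.' :: PySem.Chars.join ['.'] (a :: b) := by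
  simp [PySem.Chars.join_cons_cons]

theorem join_take_dot (h : List Char) (t : List (List Char)) (j : Nat) :
    PySem.Chars.join ['.'] (([] :: h :: t).take (j + 2)) =
      '.' :: PySem.Chars.join ['.'] ((h :: t).take (j + 1)) := by
  simp only [List.take_succ_cons, join_nil_cons]

theorem join_take_char (c : Char) (h : List Char) (t : List (List Char)) (i : Nat) :
    PySem.Chars.join ['.'] (((c :: h) :: t).take (i + 1)) =
      c :: PySem.Chars.join ['.'] ((h :: t).take (i + 1)) := by
  simp only [List.take_succ_cons, join_cons_eq]

theorem pSplit_prefix_iff (cs : List Char) : ∀ p : List Char,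
    (∃ i < (pSplit cs).length, PySem.Chars.join ['.'] ((pSplit cs).take (i + 1)) = p) ↔
      (p ++ ['.']) <+: (cs ++ ['.']) := by
  induction cs with
  | nil =>
    intro p
    constructor
    · rintro ⟨i, hi, rfl⟩
      simp only [pSplit, List.length_cons, List.length_nil] at hi
      have : i = 0 := by omega
      subst this
      simp [pSplit, PySem.Chars.join, List.intercalate]
    · intro hp
      have hlen := hp.length_le
      simp only [List.length_append, List.length_cons, List.length_nil, List.nil_append] at hlen
      have hp0 : p = [] := List.eq_nil_of_length_eq_zero (by omega)
      subst hp0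
      exact ⟨0, by simp [pSplit], by simp [pSplit, PySem.Chars.join, List.intercalate]⟩
  | cons c rest ih =>
    intro p
    cases hpr : pSplit rest with
    | nil => exact absurd hpr (pSplit_ne_nil rest)
    | cons h t =>
      by_cases hc : c = '.'
      · subst hc
        simp only [pSplit, hpr, ite_true]
        constructor
        · rintro ⟨i, hi, rfl⟩
          cases i with
          | zero => simp [PySem.Chars.join, List.intercalate]
          | succ j =>
            rw [show j + 1 + 1 = j + 2 from rfl, join_take_dot]
            simp only [List.cons_append, List.cons_prefix_cons, true_and]
            exact (ih _).mp ⟨j, by simp at hi ⊢; rw [hpr]; simp; omega, by rw [hpr]⟩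
        · intro hp
          cases p with
          | nil => exact ⟨0, by simp, by simp [PySem.Chars.join, List.intercalate]⟩
          | cons a q =>
            simp only [List.cons_append, List.cons_prefix_cons] at hp
            obtain ⟨rfl, hq⟩ := hp
            obtain ⟨j, hj, hjoin⟩ := (ih q).mpr hq
            rw [hpr] at hj hjoin
            refine ⟨j + 1, by simp at hj ⊢; omega, ?_⟩
            rw [show j + 1 + 1 = j + 2 from rfl, join_take_dot, hjoin]
      · simp only [pSplit, if_neg hc, hpr, List.modifyHead]
        constructor
        · rintro ⟨i, hi, rfl⟩
          rw [join_take_char]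
          simp only [List.cons_append, List.cons_prefix_cons, true_and]
          exact (ih _).mp ⟨i, by simp at hi ⊢; rw [hpr]; simpa, by rw [hpr]⟩
        · intro hp
          cases p with
          | nil =>
            simp only [List.nil_append, List.cons_append, List.cons_prefix_cons] at hp
            exact absurd hp.1.symm hc
          | cons a q =>
            simp only [List.cons_append, List.cons_prefix_cons] at hp
            obtain ⟨rfl, hq⟩ := hp
            obtain ⟨i, hi, hjoin⟩ := (ih q).mpr hq
            rw [hpr] at hi hjoin
            exact ⟨i, by simpa using hi, by rw [join_take_char, hjoin]⟩

theorem ports_agree (code : String) (type_key : String) (type_rules : List (String × List (String × List String))) :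
    code_allowed_for_type_py code type_key type_rules = code_allowed_for_type_py_alt code type_key type_rules := by
  unfold code_allowed_for_type_py code_allowed_for_type_py_alt
  cases PySem.Dict.get? (PySem.Dict.mk type_rules) type_key with
  | none => rfl
  | some entry =>
    simp only
    split_ifs with hcode
    · rfl
    · rw [Bool.eq_iff_iff]
      simp only [List.any_eq_true, List.mem_range, splitOn_eq_pSplit,
        PySem.Set.contains, List.contains_iff_mem, PySem.Chars.startswith_iff]
      constructor
      · rintro ⟨i, hi, hmem⟩
        rw [PySem.Set.mem_ofList] at hmem
        refine ⟨_, hmem, ?_⟩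
        have := (pSplit_prefix_iff code.toList
          (String.ofList (PySem.Chars.join ['.'] ((pSplit code.toList).take (i + 1)))).toList).mp
          ⟨i, hi, by simp⟩
        simpa using this
      · rintro ⟨p, hmem, hpre⟩
        obtain ⟨i, hi, hjoin⟩ := (pSplit_prefix_iff code.toList p.toList).mpr hpre
        refine ⟨i, hi, ?_⟩
        rw [PySem.Set.mem_ofList, hjoin, String.ofList_toList]
        exact hmem

-- ===== VERDICT (by name: the statement is the Claim_ definition above) =====
theorem code_allowed_for_type_py_spec : Claim_equal_code_allowed_for_type_py := by
  intro code type_key type_rules _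
  exact ports_agree code type_key type_rules
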